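-- pv_equiv track=rewrite | github.com/kiwoook/codingtest | 프로그래머스/광물_캐기.py | solution
-- ===== SOURCE A (Python) =====
-- from collections import Counter
--
-- def solution(picks, minerals):
--     answer = 0
--     minerals_list = []
--     idx = 0
--
--     if sum(picks) * 5 < len(minerals):
--         minerals = minerals[:sum(picks) * 5]
--
--     for i in range(0, len(minerals), 5):
--         minerals_list.append(minerals[i:i + 5])
--
--     sorted_minerals = sorted(minerals_list,
--                              key=lambda x: (Counter(x)["diamond"], Counter(x)["iron"], Counter(x)["stone"]),
--                              reverse=True)
--
--     for mineral_list in sorted_minerals: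
--         while picks[idx] == 0:
--             idx += 1
--         for m in mineral_list:
--             if idx == 0:
--                 answer += 1
--             if idx == 1:
--                 if m == "diamond":
--                     answer += 5
--                 else:
--                     answer += 1
--             if idx == 2:
--                 if m == "diamond":
--                     answer += 25
--                 elif m == "iron":
--                     answer += 5
--                 else:
--                     answer += 1
--         picks[idx] -= 1
--
--     return answer
-- ===== SOURCE B (Python) =====
-- # B: counting-sort by the bounded key space. Each 5-chunk's key (nd, ni, ns) lives in
-- # {0..5}^3, so instead of sorting the chunks B groups their lengths into key buckets and
-- # walks the 6*6*6 keys from best to worst, pricing each chunk in closed form from its key,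
-- # its length and the pick type its position falls into (an advancing cursor over the
-- # cumulative pick capacities). B does not mutate the picks list (the equivalence claimed
-- # is about the return value).
-- def solution(picks, minerals):
--     total = sum(picks)
--     minerals = minerals[:5 * total]
--     buckets = {}
--     for i in range(0, len(minerals), 5):
--         chunk = minerals[i:i + 5]
--         key = (chunk.count("diamond"), chunk.count("iron"), chunk.count("stone"))
--         buckets.setdefault(key, []).append(len(chunk))
--     cums = []
--     acc = 0
--     for p in picks:
--         acc += p
--         cums.append(acc)
--     answer = 0
--     pos = 0
--     t = 0
--     for nd in range(5, -1, -1):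
--         for ni in range(5, -1, -1):
--             for ns in range(5, -1, -1):
--                 for ln in buckets.get((nd, ni, ns), []):
--                     while t < len(cums) and cums[t] <= pos:
--                         t += 1
--                     if t == 0:
--                         answer += ln
--                     elif t == 1:
--                         answer += ln + 4 * nd
--                     elif t == 2:
--                         answer += ln + 24 * nd + 4 * ni
--                     pos += 1
--     return answer
-- ===== Notes on version B (the rewrite author's own statement) =====
-- stated objective: alternative
-- what changed: Replaces A's comparison sort plus stateful pick cursor (while-loop skipping exhausted picks, per-mineral if-chains, in-place decrements of the picks list) by a counting-sort: chunk lengths are grouped into buckets keyed by the bounded count triple (nd,ni,ns), the 216 possible keys are walked best-to-worst, and each chunk is priced in closed form from its key, its length and the pick type its position falls into (an advancing cursor over cumulative pick capacities); …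
-- outside the precondition, e.g. on solution([-1, 2, 0], ['diamond', 'diamond', 'diamond', 'diamond', 'diamond']): A returns 5, B returns 25
import Mathlib
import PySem

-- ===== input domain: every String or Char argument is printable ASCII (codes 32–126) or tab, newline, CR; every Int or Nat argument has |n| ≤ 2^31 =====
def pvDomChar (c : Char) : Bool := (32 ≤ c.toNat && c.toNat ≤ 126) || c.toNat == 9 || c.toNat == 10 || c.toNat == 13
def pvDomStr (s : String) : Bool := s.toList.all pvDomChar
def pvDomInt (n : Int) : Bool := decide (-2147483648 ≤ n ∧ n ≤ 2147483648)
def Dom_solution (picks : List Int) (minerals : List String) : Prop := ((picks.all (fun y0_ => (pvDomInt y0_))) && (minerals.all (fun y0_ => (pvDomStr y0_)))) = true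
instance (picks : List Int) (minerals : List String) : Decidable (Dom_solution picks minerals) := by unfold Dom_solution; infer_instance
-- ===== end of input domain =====

-- B replaces A's comparison sort + stateful pick cursor by a counting-sort over the bounded
-- key space {0..5}^3: chunk lengths are grouped into key buckets, the 216 keys are walked
-- best-to-worst and each chunk is priced in closed form from its key, its length and the
-- pick type its position falls into (cumulative pick capacities). A mutates its `picks`
-- argument in Python, B does not: the equivalence proved here is about the return value.

-- ===== PORT A =====
-- the body of A's inner `for m in mineral_list` loop (three successive ifs on idx)
def aStep (idx : Nat) (a : Int) (m : String) : Int :=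
  let a1 := if idx = 0 then a + 1 else a
  let a2 := if idx = 1 then (if m = "diamond" then a1 + 5 else a1 + 1) else a1
  if idx = 2 then (if m = "diamond" then a2 + 25 else if m = "iron" then a2 + 5 else a2 + 1) else a2

-- `while picks[idx] == 0: idx += 1`; none = IndexError
def aFind (picks : List Int) (idx : Nat) : Option Nat :=
  match h : PySem.List.pyGet? picks (idx : Int) with
  | none => none
  | some v => if v = 0 then aFind picks (idx + 1) else some idx
termination_by picks.length - idx
decreasing_by
  rw [PySem.List.pyGet?_natCast] at h
  have := (List.getElem?_eq_some_iff.mp h).1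
  omega

-- `for mineral_list in sorted_minerals: …` with state (picks, idx, answer)
def aLoop : List (List String) → List Int → Nat → Int → Int
  | [], _, _, ans => ans
  | g :: rest, picks, idx, ans =>
    match aFind picks idx with
    | none => 0  -- Python raises IndexError here; unreachable on the inputs Pre_ admits
    | some j =>
      aLoop rest (PySem.List.pySetD picks (j : Int) (PySem.List.pyGetD picks (j : Int) 0 - 1)) j
        (g.foldl (aStep j) ans)

def solution (picks : List Int) (minerals : List String) : Int :=
  let m := if picks.sum * 5 < (minerals.length : Int)
           then PySem.List.slice minerals none (some (picks.sum * 5)) else minerals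
  let mineralsList := (PySem.List.pyRange 0 (m.length : Int) 5).foldl
      (fun acc i => acc ++ [PySem.List.slice m (some i) (some (i + 5))]) []
  -- sorted(..., key=lambda x: (Counter(x)["diamond"], Counter(x)["iron"], Counter(x)["stone"]),
  --        reverse=True): tuple key via sorted2, the inner pair as one Lex component
  let sortedMinerals := PySem.List.sorted2 mineralsList
      (fun x => (PySem.List.count x "diamond" : Int))
      (fun x => (toLex ((PySem.List.count x "iron" : Int), (PySem.List.count x "stone" : Int))
        : Lex (Int × Int))) true
  aLoop sortedMinerals picks 0 0

-- ===== PORT B =====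
-- `while t < len(cums) and cums[t] <= pos: t += 1`
def adv (cums : List Int) (pos : Int) (t : Nat) : Nat :=
  if h : t < cums.length then
    (if cums[t] ≤ pos then adv cums pos (t + 1) else t)
  else t
termination_by cums.length - t

def solution_alt (picks : List Int) (minerals : List String) : Int :=
  let total := picks.sum
  let m := PySem.List.slice minerals none (some (5 * total))
  let buckets := (PySem.List.pyRange 0 (m.length : Int) 5).foldl
      (fun (d : PySem.Dict (Int × Int × Int) (List Int)) i =>
        let chunk := PySem.List.slice m (some i) (some (i + 5))
        let key : Int × Int × Int := ((PySem.List.count chunk "diamond" : Int),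
          (PySem.List.count chunk "iron" : Int), (PySem.List.count chunk "stone" : Int))
        d.insert key (d.getD key [] ++ [(chunk.length : Int)]))
      PySem.Dict.empty
  let cums := (picks.foldl (fun (s : List Int × Int) p => (s.1 ++ [s.2 + p], s.2 + p)) ([], 0)).1
  let res := (PySem.List.pyRange 5 (-1) (-1)).foldl (fun (s : Int × Int × Nat) nd =>
      (PySem.List.pyRange 5 (-1) (-1)).foldl (fun s ni =>
        (PySem.List.pyRange 5 (-1) (-1)).foldl (fun s ns =>
          (buckets.getD (nd, ni, ns) []).foldl (fun s ln =>
            let t := adv cums s.2.1 s.2.2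
            (s.1 + (if t = 0 then ln
                    else if t = 1 then ln + 4 * nd
                    else if t = 2 then ln + 24 * nd + 4 * ni else 0), s.2.1 + 1, t)) s) s) s)
      (0, 0, 0)
  res.1

-- ===== PRECONDITION & SPEC =====
-- Pre_ restricts to non-negative pick counts, the task's natural domain: on a list with a
-- negative entry no behaviour is specified and A and B legitimately diverge (A's while-loop
-- only skips zeros, so A treats a reached negative pick as unlimited; B reads capacities
-- from cumulative sums), so nothing is claimed there.
def Pre_solution (picks : List Int) (minerals : List String) : Prop := ∀ p ∈ picks, 0 ≤ p
instance (picks : List Int) (minerals : List String) : Decidable (Pre_solution picks minerals) := by unfold Pre_solution; infer_instance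
def pvWitness_solution : List Int × List String :=
  ([1, 0, 1], ["diamond", "stone", "stone", "iron", "stone", "iron"])

def Spec_solution (picks : List Int) (minerals : List String) (out : Int) : Prop := out = solution_alt picks minerals
instance (picks : List Int) (minerals : List String) (out : Int) : Decidable (Spec_solution picks minerals out) := by unfold Spec_solution; infer_instance

-- ===== CLAIM (what is proved, stated in full; the proofs are below) =====
def Claim_equal_solution : Prop := ∀ (picks : List Int) (minerals : List String), Dom_solution picks minerals → Pre_solution picks minerals → Spec_solution picks minerals (solution picks minerals)

-- ===== LEMMAS AND PROOFS =====

-- the count triple of a chunk, and its lexicographic packaging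
def kOf (g : List String) : Int × Int × Int :=
  ((PySem.List.count g "diamond" : Int), (PySem.List.count g "iron" : Int),
   (PySem.List.count g "stone" : Int))

def toL (k : Int × Int × Int) : Lex (Int × Lex (Int × Int)) := toLex (k.1, toLex (k.2.1, k.2.2))

-- the 216 possible keys, best first (B's three nested loops, flattened)
def keysDesc : List (Int × Int × Int) :=
  (PySem.List.pyRange 5 (-1) (-1)).flatMap (fun nd =>
    (PySem.List.pyRange 5 (-1) (-1)).flatMap (fun ni =>
      (PySem.List.pyRange 5 (-1) (-1)).map (fun ns => (nd, ni, ns))))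

-- closed-form value of one chunk mined with pick type t
def bVal (t : Int) (grp : List String) : Int :=
  if t = 0 then (grp.length : Int)
  else if t = 1 then (grp.length : Int) + 4 * (PySem.List.count grp "diamond" : Int)
  else if t = 2 then (grp.length : Int) + 24 * (PySem.List.count grp "diamond" : Int)
                       + 4 * (PySem.List.count grp "iron" : Int)
  else 0

-- common functional description of the pick-consumption process
def run : List Int → Int → List (List String) → Int
  | _, _, [] => 0
  | [], _, _ :: _ => 0
  | p :: ps, base, g :: rest =>
    if p = 0 then run ps (base + 1) (g :: rest)
    else bVal base g + run ((p - 1) :: ps) base rest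
termination_by l _ gs => gs.length + l.length

-- cumulative sums of the pick list
def cumsOf : List Int → List Int
  | [] => []
  | p :: ps => p :: (cumsOf ps).map (p + ·)

-- number of cumulative capacities already exhausted at position pos (B's `t`)
def tcnt (l : List Int) (pos : Int) : Int :=
  ((cumsOf l).map (fun c => if c ≤ pos then (1 : Int) else 0)).sum

-- positional value sum over the sorted group list, types read off the cumulative capacities
def vsum (l : List Int) (base : Int) : Int → List (List String) → Int
  | _, [] => 0
  | pos, g :: rest => bVal (base + tcnt l pos) g + vsum l base (pos + 1) rest

-- B's per-pair value (key components and length instead of the chunk itself)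
def V (picks : List Int) (pos : Int) (x : (Int × Int × Int) × Int) : Int :=
  let t := tcnt picks pos
  if t = 0 then x.2
  else if t = 1 then x.2 + 4 * x.1.1
  else if t = 2 then x.2 + 24 * x.1.1 + 4 * x.1.2.1 else 0

-- positional sum driven by an arbitrary position-indexed value function
def psum {β : Type} (F : Int → β → Int) : Int → List β → Int
  | _, [] => 0
  | pos, x :: rest => F pos x + psum F (pos + 1) rest

-- `capacity used so far` invariant: A's while-loop never runs off the end
def Enough (l : List Int) (n : Nat) : Prop := (∃ x ∈ l, x < 0) ∨ (n : Int) ≤ l.sum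

-- ---------- arithmetic lemmas about cumsOf / tcnt ----------

theorem cums_fold (l : List Int) : ∀ (acc0 : List Int) (a : Int),
    (l.foldl (fun (s : List Int × Int) p => (s.1 ++ [s.2 + p], s.2 + p)) (acc0, a)).1
      = acc0 ++ (cumsOf l).map (a + ·) := by
  induction l with
  | nil => intro acc0 a; simp [cumsOf]
  | cons p ps ih =>
    intro acc0 a
    rw [List.foldl_cons, ih]
    simp [cumsOf, List.map_map, add_assoc]

theorem tcnt_zero_cons (ps : List Int) (pos : Int) (h : 0 ≤ pos) :
    tcnt (0 :: ps) pos = 1 + tcnt ps pos := by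
  simp [tcnt, cumsOf, h]

theorem tcnt_shift (p : Int) (ps : List Int) (pos : Int) :
    tcnt (p :: ps) (pos + 1) = tcnt ((p - 1) :: ps) pos := by
  simp only [tcnt, cumsOf, List.map_cons, List.map_map, List.sum_cons]
  have h1 : (if p ≤ pos + 1 then (1:Int) else 0) = (if p - 1 ≤ pos then (1:Int) else 0) := by
    split_ifs <;> omega
  rw [h1]
  congr 1
  apply congrArg List.sum
  apply List.map_congr_left
  intro c _
  simp only [Function.comp_apply]
  have : (p + c ≤ pos + 1) ↔ (p - 1 + c ≤ pos) := by omega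
  simp [this]

theorem cumsOf_nonneg : ∀ (l : List Int), (∀ q ∈ l, 0 ≤ q) → ∀ c ∈ cumsOf l, 0 ≤ c := by
  intro l
  induction l with
  | nil => intro _ c hc; simp [cumsOf] at hc
  | cons p ps ih =>
    intro h c hc
    simp only [cumsOf, List.mem_cons, List.mem_map] at hc
    rcases hc with rfl | ⟨d, hd, rfl⟩
    · exact h c (by simp)
    · have := ih (fun r hr => h r (by simp [hr])) d hd
      have := h p (by simp)
      omega

theorem cumsOf_pos (ps : List Int) (hps : ∀ q ∈ ps, 0 ≤ q) (p : Int) :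
    ∀ c ∈ cumsOf (p :: ps), p ≤ c := by
  intro c hc
  simp only [cumsOf, List.mem_cons, List.mem_map] at hc
  rcases hc with rfl | ⟨d, hd, rfl⟩
  · omega
  · have := cumsOf_nonneg ps hps d hd
    omega

theorem tcnt_zero_of_pos (p : Int) (ps : List Int) (hp : 1 ≤ p) (hps : ∀ q ∈ ps, 0 ≤ q) :
    tcnt (p :: ps) 0 = 0 := by
  unfold tcnt
  have h : ∀ c ∈ cumsOf (p :: ps), ¬ (c ≤ 0) := by
    intro c hc
    have := cumsOf_pos ps hps p c hc
    omega
  rw [List.map_congr_left (g := fun _ => (0:Int)) (fun c hc => by simp [h c hc])]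
  simp

-- ---------- vsum and run ----------

theorem vsum_zero_cons (ps : List Int) (base : Int) :
    ∀ (gs : List (List String)) (pos : Int), 0 ≤ pos →
      vsum (0 :: ps) base pos gs = vsum ps (base + 1) pos gs := by
  intro gs
  induction gs with
  | nil => intro pos _; simp [vsum]
  | cons g rest ih =>
    intro pos hpos
    rw [vsum, vsum, tcnt_zero_cons ps pos hpos, ih (pos + 1) (by omega)]
    ring_nf

theorem vsum_shift (p : Int) (ps : List Int) (base : Int) :
    ∀ (gs : List (List String)) (pos : Int),
      vsum (p :: ps) base (pos + 1) gs = vsum ((p - 1) :: ps) base pos gs := by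
  intro gs
  induction gs with
  | nil => simp [vsum]
  | cons g rest ih =>
    intro pos
    rw [vsum, vsum, tcnt_shift p ps pos, ih (pos + 1)]

theorem run_vsum : ∀ (N : Nat) (l : List Int) (gs : List (List String)) (base : Int),
    l.length + gs.length ≤ N → (∀ p ∈ l, 0 ≤ p) → (gs.length : Int) ≤ l.sum →
    run l base gs = vsum l base 0 gs := by
  intro N
  induction N with
  | zero =>
    intro l gs base h _ _
    have : gs = [] := by cases gs <;> simp_all
    subst this; cases l <;> simp [run, vsum]
  | succ N ih =>
    intro l gs base h hnn hcap
    cases gs with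
    | nil => cases l <;> simp [run, vsum]
    | cons g rest =>
      cases l with
      | nil => simp at hcap; omega
      | cons p ps =>
        have hps : ∀ q ∈ ps, 0 ≤ q := fun q hq => hnn q (by simp [hq])
        by_cases hp : p = 0
        · subst hp
          rw [run, if_pos rfl]
          rw [ih ps (g :: rest) (base + 1) (by simp at h ⊢; omega) hps (by simp at hcap ⊢; omega)]
          rw [vsum_zero_cons ps base (g :: rest) 0 le_rfl]
        · have hp1 : 1 ≤ p := by
            have := hnn p (by simp); omega
          rw [run, if_neg hp]
          rw [ih ((p - 1) :: ps) rest base (by simp at h ⊢; omega)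
              (by intro q hq; rcases List.mem_cons.mp hq with rfl | hq
                  · omega
                  · exact hps q hq)
              (by simp at hcap ⊢; omega)]
          rw [vsum, tcnt_zero_of_pos p ps hp1 hps]
          rw [show (0:Int) + 1 = 0 + 1 by rfl, vsum_shift p ps base rest 0]
          ring_nf

-- ---------- A's loop equals run (as in the port, stateful cursor) ----------

theorem foldA (idx : Nat) : ∀ (g : List String) (ans : Int),
    g.foldl (aStep idx) ans = ans + bVal (idx : Int) g := by
  intro g
  induction g with
  | nil => intro ans; simp only [List.foldl_nil, bVal, PySem.List.count_eq]; split_ifs <;> simp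
  | cons m g ih =>
    intro ans
    have hstep : aStep idx ans m = ans + aStep idx 0 m := by
      unfold aStep; dsimp only; split_ifs <;> omega
    rw [List.foldl_cons, ih, hstep]
    have : bVal (idx : Int) (m :: g) = bVal (idx : Int) g + aStep idx 0 m := by
      unfold bVal aStep
      dsimp only
      by_cases h0 : idx = 0 <;> by_cases h1 : idx = 1 <;> by_cases h2 : idx = 2 <;>
        by_cases hd : m = "diamond" <;> by_cases hi : m = "iron" <;>
        simp_all [PySem.List.count_eq] <;> omega
    omega

theorem aFind_zero (picks : List Int) (idx : Nat)
    (h : PySem.List.pyGet? picks (idx : Int) = some 0) :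
    aFind picks idx = aFind picks (idx + 1) := by
  rw [aFind]
  split
  · simp_all
  · next v heq => rw [h] at heq; cases heq; simp

theorem aFind_pos (picks : List Int) (idx : Nat) (q : Int)
    (h : PySem.List.pyGet? picks (idx : Int) = some q) (hq : q ≠ 0) :
    aFind picks idx = some idx := by
  rw [aFind]
  split
  · simp_all
  · next v heq => rw [h] at heq; cases heq; simp [hq]

theorem A_run : ∀ (N : Nat) (groups : List (List String)) (picks : List Int) (idx : Nat) (ans : Int),
    groups.length + (picks.length - idx) ≤ N →
    Enough (picks.drop idx) groups.length →
    aLoop groups picks idx ans = ans + run (picks.drop idx) (idx : Int) groups := by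
  intro N
  induction N with
  | zero =>
    intro groups picks idx ans h he
    have hg : groups = [] := by cases groups <;> simp_all
    subst hg
    simp [aLoop, run]
  | succ N ih =>
    intro groups picks idx ans h he
    cases groups with
    | nil => simp [aLoop, run]
    | cons g rest =>
      rcases hdrop : picks.drop idx with _ | ⟨q, qs⟩
      · exfalso
        rcases he with ⟨x, hx, _⟩ | hle
        · rw [hdrop] at hx; simp at hx
        · rw [hdrop] at hle; simp at hle; omega
      · have hlen : idx < picks.length := by
          by_contra hcon
          have : picks.drop idx = [] := List.drop_eq_nil_of_le (by omega)
          rw [this] at hdrop; simp at hdrop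
        have hget : PySem.List.pyGet? picks (idx : Int) = some q := by
          rw [PySem.List.pyGet?_natCast]
          have : (List.drop idx picks)[0]? = some q := by rw [hdrop]; rfl
          rwa [List.getElem?_drop, Nat.add_zero] at this
        have hdropsucc : picks.drop (idx + 1) = qs := by
          rw [← List.drop_drop, hdrop]; rfl
        by_cases hq : q = 0
        · subst hq
          have hstep : aLoop (g :: rest) picks idx ans = aLoop (g :: rest) picks (idx + 1) ans := by
            rw [aLoop, aLoop, aFind_zero picks idx hget]
          rw [hstep]
          have hih := ih (g :: rest) picks (idx + 1) ans (by simp at h ⊢; omega)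
            (by rw [hdropsucc]
                rcases he with ⟨x, hx, hxneg⟩ | hle
                · rw [hdrop] at hx
                  rcases List.mem_cons.mp hx with hx | hx
                  · omega
                  · exact Or.inl ⟨x, hx, hxneg⟩
                · right
                  rw [hdrop] at hle
                  simp at hle ⊢
                  omega)
          rw [hih]
          rw [hdropsucc]
          conv_rhs => rw [run]
          rw [if_pos rfl]
          push_cast
          rfl
        · rw [aLoop, aFind_pos picks idx q hget hq]
          dsimp only
          have hgetD : PySem.List.pyGetD picks (idx : Int) 0 = q := by
            rw [PySem.List.pyGetD_natCast]
            have : picks[idx]? = some q := by rw [PySem.List.pyGet?_natCast] at hget; exact hget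
            simp [List.getD, this]
          have hset : (PySem.List.pySetD picks (idx : Int) (q - 1)).drop idx = (q - 1) :: qs := by
            rw [PySem.List.pySetD_natCast, List.drop_set]
            rw [if_neg (by omega), hdrop]
            simp
          rw [hgetD]
          have hsetlen : (PySem.List.pySetD picks (idx : Int) (q - 1)).length = picks.length := by
            rw [PySem.List.pySetD_natCast]; simp
          have hih := ih rest (PySem.List.pySetD picks (idx : Int) (q - 1)) idx
            (g.foldl (aStep idx) ans)
            (by rw [hsetlen]; simp at h ⊢; omega)
            (by rw [hset]
                rcases he with ⟨x, hx, hxneg⟩ | hle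
                · rw [hdrop] at hx
                  rcases List.mem_cons.mp hx with hx | hx
                  · exact Or.inl ⟨q - 1, List.mem_cons_self .., by omega⟩
                  · exact Or.inl ⟨x, List.mem_cons_of_mem _ hx, hxneg⟩
                · right
                  rw [hdrop] at hle
                  simp at hle ⊢
                  omega)
          rw [hih]
          rw [hset]
          conv_rhs => rw [run]
          rw [if_neg hq, foldA]
          ring

-- ---------- the key list: strictly descending, and it covers every chunk key ----------

set_option maxRecDepth 10000 in
theorem keysDesc_pairwise : keysDesc.Pairwise (fun a b => toL b < toL a) := by decide

theorem mem_keysDesc (k : Int × Int × Int) (h1 : 0 ≤ k.1) (h2 : k.1 ≤ 5) (h3 : 0 ≤ k.2.1)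
    (h4 : k.2.1 ≤ 5) (h5 : 0 ≤ k.2.2) (h6 : k.2.2 ≤ 5) : k ∈ keysDesc := by
  have hr : ∀ x : Int, 0 ≤ x → x ≤ 5 → x ∈ PySem.List.pyRange 5 (-1) (-1) := by
    have : PySem.List.pyRange 5 (-1) (-1) = [5, 4, 3, 2, 1, 0] := by decide
    intro x hx hx'
    rw [this]
    simp only [List.mem_cons, List.not_mem_nil, or_false]
    omega
  unfold keysDesc
  simp only [List.mem_flatMap, List.mem_map]
  exact ⟨k.1, hr _ h1 h2, k.2.1, hr _ h3 h4, k.2.2, hr _ h5 h6, rfl⟩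

-- ---------- stable descending sort = bucket concatenation ----------

theorem insertBy_cons {α : Type} (bef : α → α → Bool) (x y : α) (ys : List α) :
    PySem.List.insertBy bef x (y :: ys) =
      if bef x y then x :: y :: ys else y :: PySem.List.insertBy bef x ys := by
  simp [PySem.List.insertBy]

theorem insertBy_skip {α : Type} (bef : α → α → Bool) (x : α) :
    ∀ (pre suf : List α), (∀ y ∈ pre, bef x y = false) →
      PySem.List.insertBy bef x (pre ++ suf) = pre ++ PySem.List.insertBy bef x suf := by
  intro pre
  induction pre with
  | nil => intro suf _; simp
  | cons y ys ih =>
    intro suf h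
    rw [List.cons_append, insertBy_cons, if_neg (by simp [h y (by simp)]),
      ih suf (fun z hz => h z (by simp [hz]))]
    simp

theorem insertBy_front {α : Type} (bef : α → α → Bool) (x : α) (ys : List α)
    (h : ∀ y ∈ ys, bef x y = true) : PySem.List.insertBy bef x ys = x :: ys := by
  cases ys with
  | nil => simp [PySem.List.insertBy]
  | cons y ys => rw [insertBy_cons, if_pos (h y (by simp))]

theorem toL_lt_irrefl (c : Int × Int × Int) : ¬ toL c < toL c := lt_irrefl _

-- sorted2's two-key comparison is exactly the lexicographic order toL
theorem blt_toL (j k : Int × Int × Int) :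
    (decide (j.1 < k.1) || !decide (k.1 < j.1) && decide ((toLex j.2 : Lex (Int × Int)) < toLex k.2))
      = decide (toL j < toL k) := by
  unfold toL
  by_cases h1 : j.1 < k.1 <;> by_cases h2 : k.1 < j.1 <;>
    simp [Prod.Lex.toLex_lt_toLex, h1, h2] <;> omega

theorem ins {α : Type} (k : α → Int × Int × Int) (bef : α → α → Bool)
    (hbef : ∀ a b, bef a b = decide (toL (k b) < toL (k a))) (x : α) :
    ∀ (ks : List (Int × Int × Int)), ks.Pairwise (fun a b => toL b < toL a) → k x ∈ ks →
    ∀ (l : List α),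
    PySem.List.insertBy bef x
        (ks.flatMap (fun c => l.filter (fun g => decide (k g = c))))
      = ks.flatMap (fun c => (l ++ [x]).filter (fun g => decide (k g = c))) := by
  intro ks
  induction ks with
  | nil => intro _ hmem; simp at hmem
  | cons c ks' ih =>
    intro pw hmem l
    have hlt : ∀ c' ∈ ks', toL c' < toL c := (List.pairwise_cons.mp pw).1
    have pw' := (List.pairwise_cons.mp pw).2
    rw [List.flatMap_cons, List.flatMap_cons]
    have hfilt : ∀ y ∈ l.filter (fun g => decide (k g = c)), k y = c := by
      intro y hy
      have := (List.mem_filter.mp hy).2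
      simpa using this
    by_cases hx : k x = c
    · have hpre : ∀ y ∈ l.filter (fun g => decide (k g = c)), bef x y = false := by
        intro y hy
        rw [hbef]
        simp only [decide_eq_false_iff_not]
        rw [hfilt y hy, hx]
        exact toL_lt_irrefl c
      rw [insertBy_skip _ _ _ _ hpre]
      have hsuf : ∀ y ∈ ks'.flatMap (fun c => l.filter (fun g => decide (k g = c))),
          bef x y = true := by
        intro y hy
        simp only [List.mem_flatMap, List.mem_filter] at hy
        obtain ⟨c', hc', _, hy2⟩ := hy
        rw [hbef]
        simp only [decide_eq_true_eq]
        have : k y = c' := by simpa using hy2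
        rw [this, hx]
        exact hlt c' hc'
      rw [insertBy_front _ _ _ hsuf]
      have h1 : (l ++ [x]).filter (fun g => decide (k g = c))
          = l.filter (fun g => decide (k g = c)) ++ [x] := by
        rw [List.filter_append]
        simp [hx]
      have h2 : ks'.flatMap (fun c => (l ++ [x]).filter (fun g => decide (k g = c)))
          = ks'.flatMap (fun c => l.filter (fun g => decide (k g = c))) := by
        apply List.flatMap_congr
        intro c' hc'
        rw [List.filter_append]
        have : k x ≠ c' := by
          intro h
          have hcc : c = c' := hx.symm.trans h
          exact toL_lt_irrefl c' (hcc ▸ hlt c' hc')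
        simp [this]
      rw [h1, h2]
      simp
    · have hmem' : k x ∈ ks' := by
        rcases List.mem_cons.mp hmem with h | h
        · exact absurd h hx
        · exact h
      have hpre : ∀ y ∈ l.filter (fun g => decide (k g = c)), bef x y = false := by
        intro y hy
        rw [hbef]
        simp only [decide_eq_false_iff_not]
        rw [hfilt y hy]
        exact fun h => absurd (hlt _ hmem') (not_lt_of_gt h)
      rw [insertBy_skip _ _ _ _ hpre, ih pw' hmem' l]
      have h1 : (l ++ [x]).filter (fun g => decide (k g = c))
          = l.filter (fun g => decide (k g = c)) := by
        rw [List.filter_append]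
        simp [hx]
      rw [h1]

theorem sorteq {α : Type} (k : α → Int × Int × Int) (bef : α → α → Bool)
    (hbef : ∀ a b, bef a b = decide (toL (k b) < toL (k a))) (ks : List (Int × Int × Int))
    (pw : ks.Pairwise (fun a b => toL b < toL a)) :
    ∀ (l : List α), (∀ g ∈ l, k g ∈ ks) →
    l.foldl (fun acc x => PySem.List.insertBy bef x acc) []
      = ks.flatMap (fun c => l.filter (fun g => decide (k g = c))) := by
  intro l
  induction l using List.reverseRecOn with
  | nil => simp
  | append_singleton l x ih =>
    intro h
    rw [List.foldl_append, List.foldl_cons, List.foldl_nil]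
    rw [ih (fun g hg => h g (by simp [hg]))]
    exact ins k bef hbef x ks pw (h x (by simp)) l

-- ---------- the grouping dict and the position-counting fold ----------

theorem dict_group {α : Type} (f : α → Int × Int × Int) (g : α → Int) :
    ∀ (xs : List α) (d : PySem.Dict (Int × Int × Int) (List Int)) (k : Int × Int × Int),
      (xs.foldl (fun d x => d.insert (f x) (d.getD (f x) [] ++ [g x])) d).getD k []
        = d.getD k [] ++ (xs.filter (fun x => decide (f x = k))).map g := by
  intro xs
  induction xs with
  | nil => intro d k; simp
  | cons x rest ih =>
    intro d k
    rw [List.foldl_cons, ih]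
    rw [PySem.Dict.getD_insert]
    by_cases h : k = f x
    · subst h
      simp
    · rw [if_neg h, List.filter_cons]
      have : ¬ (f x = k) := fun hh => h hh.symm
      simp [this]

-- ---------- the advancing cursor over cumulative capacities ----------

def cnt (cums : List Int) (pos : Int) : Nat := cums.countP (fun c => decide (c ≤ pos))

theorem tcnt_eq_cnt (l : List Int) (pos : Int) : tcnt l pos = (cnt (cumsOf l) pos : Int) := by
  rw [tcnt, cnt, ← PySem.List.sum_map_ite_one_zero]
  congr 1
  apply List.map_congr_left
  intro c _
  simp

theorem cums_pairwise (l : List Int) (h : ∀ q ∈ l, 0 ≤ q) : (cumsOf l).Pairwise (· ≤ ·) := by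
  induction l with
  | nil => simp [cumsOf]
  | cons p ps ih =>
    simp only [cumsOf, List.pairwise_cons]
    refine ⟨?_, ?_⟩
    · intro c hc
      simp only [List.mem_map] at hc
      obtain ⟨d, hd, rfl⟩ := hc
      have := cumsOf_nonneg ps (fun r hr => h r (by simp [hr])) d hd
      omega
    · have hm := ih (fun r hr => h r (by simp [hr]))
      exact hm.map (p + ·) (fun {a b} hab => by dsimp only; omega)

theorem cnt_getElem : ∀ (l : List Int), l.Pairwise (· ≤ ·) →
    ∀ (i : Nat) (h : i < l.length) (pos : Int), (l[i] ≤ pos ↔ i < cnt l pos) := by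
  intro l
  induction l with
  | nil => intro _ i h; simp at h
  | cons c r ih =>
    intro hp i h pos
    have hcr := List.pairwise_cons.mp hp
    cases i with
    | zero =>
      simp only [List.getElem_cons_zero, cnt, List.countP_cons]
      by_cases hc : c ≤ pos
      · simp [hc]
      · have hz : r.countP (fun x => decide (x ≤ pos)) = 0 := by
          rw [List.countP_eq_zero]
          intro x hx
          have := hcr.1 x hx
          simp only [decide_eq_true_eq]
          omega
        unfold cnt at hz
        simp [hc, hz]
    | succ j =>
      have hj : j < r.length := by simpa using h
      have hih := ih hcr.2 j hj pos
      unfold cnt at hih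
      simp only [List.getElem_cons_succ, cnt, List.countP_cons]
      by_cases hc : c ≤ pos
      · rw [hih]
        simp only [hc, decide_true, if_true]
        omega
      · have hz : r.countP (fun x => decide (x ≤ pos)) = 0 := by
          rw [List.countP_eq_zero]
          intro x hx
          have := hcr.1 x hx
          simp only [decide_eq_true_eq]
          omega
        have hrj : ¬ (r[j] ≤ pos) := by
          have := hcr.1 r[j] (List.getElem_mem hj)
          omega
        simp [hc, hz, hrj]

theorem adv_eq (cums : List Int) (hp : cums.Pairwise (· ≤ ·)) (pos : Int) :
    ∀ (fuel t : Nat), cums.length - t ≤ fuel → t ≤ cnt cums pos → adv cums pos t = cnt cums pos := by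
  have hcle : cnt cums pos ≤ cums.length := List.countP_le_length
  intro fuel
  induction fuel with
  | zero =>
    intro t hf ht
    rw [adv, dif_neg (by omega)]
    omega
  | succ n ih =>
    intro t hf ht
    rw [adv]
    by_cases hlt : t < cums.length
    · rw [dif_pos hlt]
      by_cases hc : cums[t] ≤ pos
      · rw [if_pos hc]
        exact ih (t + 1) (by omega) (by rw [cnt_getElem cums hp t hlt pos] at hc; omega)
      · rw [if_neg hc]
        rw [cnt_getElem cums hp t hlt pos] at hc
        omega
    · rw [dif_neg hlt]
      omega

theorem cnt_mono (l : List Int) (pos pos' : Int) (h : pos ≤ pos') : cnt l pos ≤ cnt l pos' := by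
  apply List.countP_mono_left
  intro x _ hx
  simp only [decide_eq_true_eq] at hx ⊢
  omega

-- B's per-pair value with the cursor resolved to the count of exhausted capacities
def Vc (cums : List Int) (pos : Int) (x : (Int × Int × Int) × Int) : Int :=
  if cnt cums pos = 0 then x.2
  else if cnt cums pos = 1 then x.2 + 4 * x.1.1
  else if cnt cums pos = 2 then x.2 + 24 * x.1.1 + 4 * x.1.2.1 else 0

theorem wfold2 (cums : List Int) (hp : cums.Pairwise (· ≤ ·)) :
    ∀ (L : List ((Int × Int × Int) × Int)) (a pos : Int) (t : Nat), t ≤ cnt cums pos →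
      (L.foldl (fun (s : Int × Int × Nat) x =>
        (s.1 + (if adv cums s.2.1 s.2.2 = 0 then x.2
                else if adv cums s.2.1 s.2.2 = 1 then x.2 + 4 * x.1.1
                else if adv cums s.2.1 s.2.2 = 2 then x.2 + 24 * x.1.1 + 4 * x.1.2.1 else 0),
         s.2.1 + 1, adv cums s.2.1 s.2.2)) (a, pos, t)).1
      = a + psum (Vc cums) pos L := by
  intro L
  induction L with
  | nil => intro a pos t _; simp [psum]
  | cons x rest ih =>
    intro a pos t ht
    rw [List.foldl_cons]
    dsimp only
    rw [adv_eq cums hp pos (cums.length - t) t le_rfl ht]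
    rw [ih _ (pos + 1) (cnt cums pos) (cnt_mono cums pos (pos + 1) (by omega))]
    rw [psum]
    simp only [Vc]
    ring

theorem psum_ext {β : Type} (F G : Int → β → Int) (h : ∀ pos x, F pos x = G pos x) :
    ∀ (L : List β) (pos : Int), psum F pos L = psum G pos L := by
  intro L
  induction L with
  | nil => intro pos; simp [psum]
  | cons x rest ih => intro pos; rw [psum, psum, h, ih]

theorem Vc_eq_V (picks : List Int) (pos : Int) (x : (Int × Int × Int) × Int) :
    Vc (cumsOf picks) pos x = V picks pos x := by
  simp only [Vc, V, tcnt_eq_cnt]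
  norm_cast

theorem psum_map_vsum (picks : List Int) :
    ∀ (S : List (List String)) (pos : Int),
      psum (V picks) pos (S.map (fun g => (kOf g, (g.length : Int))))
        = vsum picks 0 pos S := by
  intro S
  induction S with
  | nil => intro pos; simp [psum, vsum]
  | cons g rest ih =>
    intro pos
    rw [List.map_cons, psum, vsum, ih (pos + 1)]
    congr 1
    simp only [V, bVal, kOf, zero_add]

-- ---------- capacity: after truncation there are at most sum(picks) chunks ----------

theorem cap_main (picks : List Int) (minerals : List String) (hnn : ∀ p ∈ picks, 0 ≤ p) :
    (((PySem.List.pyRange 0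
        ((if picks.sum * 5 < (minerals.length : Int)
          then PySem.List.slice minerals none (some (picks.sum * 5)) else minerals).length : Int)
        5).length : Int)) ≤ picks.sum := by
  have hs : 0 ≤ picks.sum := List.sum_nonneg hnn
  rw [PySem.List.pyRange_of_pos 0 _ (by norm_num : (0:Int) < 5)]
  rw [List.length_map, List.length_range]
  by_cases hc : picks.sum * 5 < (minerals.length : Int)
  · rw [if_pos hc]
    rw [PySem.List.slice_to minerals (show (0:Int) ≤ picks.sum * 5 by omega), List.length_take]
    split_ifs <;> push_cast <;> omega
  · rw [if_neg hc]
    split_ifs <;> push_cast <;> omega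

-- ===== VERDICT (by name: the statement is the Claim_ definition above) =====
theorem solution_spec : Claim_equal_solution := by
  intro picks minerals _ hpre
  unfold Spec_solution solution solution_alt
  dsimp only
  rw [PySem.List.foldl_append_singleton_eq_map, List.nil_append]
  have hs : 0 ≤ picks.sum := List.sum_nonneg hpre
  have hm : PySem.List.slice minerals none (some (5 * picks.sum))
      = (if picks.sum * 5 < (minerals.length : Int)
         then PySem.List.slice minerals none (some (picks.sum * 5)) else minerals) := by
    by_cases hc : picks.sum * 5 < (minerals.length : Int)
    · rw [if_pos hc, mul_comm]
    · rw [if_neg hc, PySem.List.slice_to minerals (by omega),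
        List.take_of_length_le (by omega)]
  rw [hm]
  set m := (if picks.sum * 5 < (minerals.length : Int)
           then PySem.List.slice minerals none (some (picks.sum * 5)) else minerals) with hmdef
  set groups := (PySem.List.pyRange 0 ((m.length : Int)) 5).map
      (fun i => PySem.List.slice m (some i) (some (i + 5))) with hg
  set S := PySem.List.sorted2 groups
      (fun x => (PySem.List.count x "diamond" : Int))
      (fun x => (toLex ((PySem.List.count x "iron" : Int), (PySem.List.count x "stone" : Int))
        : Lex (Int × Int))) true with hSdef
  have hcums : (List.foldl (fun (s : List Int × Int) p => (s.1 ++ [s.2 + p], s.2 + p)) ([], 0) picks).1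
      = cumsOf picks := by
    rw [cums_fold]; simp
  rw [hcums]
  have hbuck : List.foldl
        (fun (d : PySem.Dict (Int × Int × Int) (List Int)) i =>
          d.insert ((PySem.List.count (PySem.List.slice m (some i) (some (i + 5))) "diamond" : Int),
              (PySem.List.count (PySem.List.slice m (some i) (some (i + 5))) "iron" : Int),
              (PySem.List.count (PySem.List.slice m (some i) (some (i + 5))) "stone" : Int))
            (d.getD ((PySem.List.count (PySem.List.slice m (some i) (some (i + 5))) "diamond" : Int),
              (PySem.List.count (PySem.List.slice m (some i) (some (i + 5))) "iron" : Int),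
              (PySem.List.count (PySem.List.slice m (some i) (some (i + 5))) "stone" : Int)) []
              ++ [((PySem.List.slice m (some i) (some (i + 5))).length : Int)]))
        PySem.Dict.empty (PySem.List.pyRange 0 ((m.length : Int)) 5)
      = List.foldl (fun (d : PySem.Dict (Int × Int × Int) (List Int)) c =>
          d.insert (kOf c) (d.getD (kOf c) [] ++ [(c.length : Int)])) PySem.Dict.empty groups := by
    rw [hg, List.foldl_map]
    rfl
  rw [hbuck]
  have hgd : ∀ k : Int × Int × Int,
      (List.foldl (fun (d : PySem.Dict (Int × Int × Int) (List Int)) c =>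
          d.insert (kOf c) (d.getD (kOf c) [] ++ [(c.length : Int)])) PySem.Dict.empty groups).getD k []
        = (groups.filter (fun g => decide (kOf g = k))).map (fun g => (g.length : Int)) := by
    intro k
    rw [dict_group (fun c => kOf c) (fun c => (c.length : Int)) groups PySem.Dict.empty k]
    simp
  simp only [hgd]
  have hflat :
      (List.foldl
        (fun (s : Int × Int × Nat) (x : (Int × Int × Int) × Int) =>
          (s.1 +
              (if adv (cumsOf picks) s.2.1 s.2.2 = 0 then x.2
               else if adv (cumsOf picks) s.2.1 s.2.2 = 1 then x.2 + 4 * x.1.1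
               else if adv (cumsOf picks) s.2.1 s.2.2 = 2 then x.2 + 24 * x.1.1 + 4 * x.1.2.1
               else 0),
            s.2.1 + 1, adv (cumsOf picks) s.2.1 s.2.2))
        (0, 0, 0)
        (keysDesc.flatMap (fun k =>
          (List.map (fun g => (g.length : Int)) (List.filter (fun g => decide (kOf g = k)) groups)).map
            (fun ln => (k, ln)))))
      = (List.foldl
        (fun (s : Int × Int × Nat) nd =>
          List.foldl
            (fun s ni =>
              List.foldl
                (fun s ns =>
                  List.foldl
                    (fun s ln =>
                      (s.1 +
                          if adv (cumsOf picks) s.2.1 s.2.2 = 0 then ln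
                          else
                            if adv (cumsOf picks) s.2.1 s.2.2 = 1 then ln + 4 * nd
                            else if adv (cumsOf picks) s.2.1 s.2.2 = 2 then ln + 24 * nd + 4 * ni else 0,
                        s.2.1 + 1, adv (cumsOf picks) s.2.1 s.2.2))
                    s (List.map (fun g => (g.length : Int)) (List.filter (fun g => decide (kOf g = (nd, ni, ns))) groups)))
                s (PySem.List.pyRange 5 (-1) (-1)))
            s (PySem.List.pyRange 5 (-1) (-1)))
        (0, 0, 0) (PySem.List.pyRange 5 (-1) (-1))) := by
    simp only [keysDesc, List.foldl_flatMap, List.foldl_map]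
  rw [← hflat]
  -- every chunk's key lies in the key table
  have hkmem : ∀ g ∈ groups, kOf g ∈ keysDesc := by
    intro g hgm
    rw [hg] at hgm
    obtain ⟨i, hi, rfl⟩ := List.mem_map.mp hgm
    have hi0 : 0 ≤ i := ((PySem.List.mem_pyRange_iff_of_pos (by norm_num) i).mp hi).1
    have hlen5 : (PySem.List.slice m (some i) (some (i + 5))).length ≤ 5 := by
      rw [PySem.List.slice_toNat m hi0 (by omega)]
      have := List.length_take_le ((i + 5).toNat - i.toNat) (List.drop i.toNat m)
      omega
    have hcd := List.count_le_length (a := "diamond") (l := PySem.List.slice m (some i) (some (i + 5)))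
    have hci := List.count_le_length (a := "iron") (l := PySem.List.slice m (some i) (some (i + 5)))
    have hcs := List.count_le_length (a := "stone") (l := PySem.List.slice m (some i) (some (i + 5)))
    apply mem_keysDesc <;> simp only [kOf, PySem.List.count_eq] <;> push_cast <;> omega
  have hS2 : S = keysDesc.flatMap (fun c => groups.filter (fun g => decide (kOf g = c))) := by
    rw [hSdef]
    show groups.foldl (fun acc x => PySem.List.insertBy _ x acc) [] = _
    refine sorteq kOf _ ?_ keysDesc keysDesc_pairwise groups hkmem
    intro a b
    exact blt_toL (kOf b) (kOf a)
  have hLK : (List.flatMap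
          (fun k =>
            List.map (fun ln => ((k : Int × Int × Int), ln))
              (List.map (fun g => ((g.length : Nat) : Int)) (List.filter (fun g => decide (kOf g = k)) groups)))
          keysDesc)
      = S.map (fun g => (kOf g, (g.length : Int))) := by
    rw [hS2, List.map_flatMap]
    apply List.flatMap_congr
    intro k _
    rw [List.map_map]
    apply List.map_congr_left
    intro g hgm
    have : kOf g = k := by simpa using (List.mem_filter.mp hgm).2
    simp [Function.comp, this]
  rw [hLK]
  rw [wfold2 (cumsOf picks) (cums_pairwise picks hpre)
      (S.map (fun g => (kOf g, (g.length : Int)))) 0 0 0 (Nat.zero_le _)]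
  rw [psum_ext (Vc (cumsOf picks)) (V picks) (Vc_eq_V picks)]
  simp only [zero_add]
  rw [psum_map_vsum picks S 0]
  -- A side
  have hcap : ((S.length : Nat) : Int) ≤ picks.sum := by
    rw [hSdef, (PySem.List.sorted2_perm groups _ _ true).length_eq, hg, List.length_map]
    conv_lhs => rw [hmdef]
    exact cap_main picks minerals hpre
  have hA := A_run (S.length + picks.length) S picks 0 0 (by omega)
    (by rw [List.drop_zero]; exact Or.inr hcap)
  simp only [List.drop_zero, Nat.cast_zero, zero_add] at hA
  rw [hA]
  exact run_vsum (picks.length + S.length) picks S 0 le_rfl hpre hcap
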